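-- pv_equiv track=rewrite | github.com/CommonRoad/SanDRA | sandra/finetuning/dataset.py | extract_available_actions
-- ===== SOURCE A (Python) =====
-- def extract_available_actions(text: str) -> tuple[list[str], list[str]]:
--     """
--     Extract available longitudinal and lateral action lists from system prompt.
--
--     Returns:
--         tuple: (longitudinal_actions, lateral_actions)
--     """
--     lines = [line.strip() for line in text.split("\n")]
--
--     longitudinal_actions = []
--     lateral_actions = []
--
--     current_section = None
--
--     for line in lines:
--         line = line.strip()
--
--         if line.startswith("Feasible longitudinal actions:"):
--             current_section = "longitudinal"
--         elif line.startswith("Feasible lateral actions:"):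
--             current_section = "lateral"
--         elif line.startswith("- ") and current_section:
--             # Extract the action (remove "- " prefix)
--             action = line[2:].strip()
--
--             if current_section == "longitudinal":
--                 longitudinal_actions.append(action)
--             elif current_section == "lateral":
--                 lateral_actions.append(action)
--
--     return longitudinal_actions, lateral_actions
-- ===== SOURCE B (Python) =====
-- def _header_tag(line):
--     if line.startswith("Feasible longitudinal actions:"):
--         return "longitudinal"
--     if line.startswith("Feasible lateral actions:"):
--         return "lateral"
--     return None
--
--
-- def _bullets(seg):
--     return [l[2:].strip() for l in seg if l.startswith("- ")]
--
--
-- def extract_available_actions(text):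
--     # Two-pass: record header positions first, then slice each section's block.
--     lines = [l.strip() for l in text.split("\n")]
--     headers = [(i, t) for i, l in enumerate(lines) for t in [_header_tag(l)] if t is not None]
--     bounds = [i for i, _ in headers[1:]] + [len(lines)]
--     lon, lat = [], []
--     for (i, tag), end in zip(headers, bounds):
--         seg = lines[i + 1:end]
--         if tag == "longitudinal":
--             lon += _bullets(seg)
--         else:
--             lat += _bullets(seg)
--     return lon, lat
-- ===== Notes on version B (the rewrite author's own statement) =====
-- stated objective: alternative
-- what changed: Replaces A's single stateful line-by-line scan (a current-section variable updated as lines stream by) with a two-pass scheme: first record the index and tag of every section-header line, then slice out each header's block of lines up to the next header and collect its '- ' bullets.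
import Mathlib
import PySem

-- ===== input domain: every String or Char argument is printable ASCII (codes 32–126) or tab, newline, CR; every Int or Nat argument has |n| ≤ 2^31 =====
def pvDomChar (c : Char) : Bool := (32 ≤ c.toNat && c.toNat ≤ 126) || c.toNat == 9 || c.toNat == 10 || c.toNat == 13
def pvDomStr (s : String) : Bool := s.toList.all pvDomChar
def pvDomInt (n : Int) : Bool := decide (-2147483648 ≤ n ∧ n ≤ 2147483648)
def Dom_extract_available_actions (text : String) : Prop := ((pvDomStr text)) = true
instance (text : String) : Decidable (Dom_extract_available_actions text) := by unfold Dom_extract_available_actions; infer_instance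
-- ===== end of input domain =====

-- B replaces A's single stateful scan by a two-pass scheme (record header positions, then
-- slice each section's block); same cost, a different decomposition.

-- ===== PORT A =====
-- one step of A's for-loop: state = (longitudinal_actions, lateral_actions, current_section)
def eaStepA (st : List String × List String × Option String) (line0 : String) :
    List String × List String × Option String :=
  let line := PySem.Str.strip line0
  if PySem.Str.startswith line "Feasible longitudinal actions:" then
    (st.1, st.2.1, some "longitudinal")
  else if PySem.Str.startswith line "Feasible lateral actions:" then
    (st.1, st.2.1, some "lateral")
  else if PySem.Str.startswith line "- " && st.2.2.isSome then
    let action := PySem.Str.strip (PySem.Str.slice line (some 2) none)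
    if st.2.2 == some "longitudinal" then (st.1 ++ [action], st.2.1, st.2.2)
    else if st.2.2 == some "lateral" then (st.1, st.2.1 ++ [action], st.2.2)
    else st
  else st

def extract_available_actions (text : String) : List String × List String :=
  -- split? with the non-empty separator "\n" always returns some
  let lines := ((PySem.Str.split? text "\n").getD []).map PySem.Str.strip
  let r := lines.foldl eaStepA ([], [], none)
  (r.1, r.2.1)

-- ===== PORT B =====
def eaHdr? (line : String) : Option String :=
  if PySem.Str.startswith line "Feasible longitudinal actions:" then some "longitudinal"
  else if PySem.Str.startswith line "Feasible lateral actions:" then some "lateral"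
  else none

def eaBullets (seg : List String) : List String :=
  (seg.filter (fun l => PySem.Str.startswith l "- ")).map
    (fun l => PySem.Str.strip (PySem.Str.slice l (some 2) none))

def extract_available_actions_alt (text : String) : List String × List String :=
  let lines := ((PySem.Str.split? text "\n").getD []).map PySem.Str.strip
  let headers := (PySem.List.enumerate lines 0).filterMap
    (fun p => (eaHdr? p.2).map (fun t => (p.1, t)))
  let bounds := (PySem.List.slice headers (some 1) none).map (fun p => p.1) ++
    [(lines.length : Int)]
  (headers.zip bounds).foldl (fun acc q =>
      let seg := PySem.List.slice lines (some (q.1.1 + 1)) (some q.2)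
      let bs := eaBullets seg
      if q.1.2 == "longitudinal" then (acc.1 ++ bs, acc.2) else (acc.1, acc.2 ++ bs))
    ([], [])

-- ===== PRECONDITION & SPEC =====
def Spec_extract_available_actions (text : String) (out : List String × List String) : Prop := out = extract_available_actions_alt text
instance (text : String) (out : List String × List String) : Decidable (Spec_extract_available_actions text out) := by unfold Spec_extract_available_actions; infer_instance

-- ===== CLAIM (what is proved, stated in full; the proofs are below) =====
def Claim_equal_extract_available_actions : Prop := ∀ (text : String), Dom_extract_available_actions text → Spec_extract_available_actions text (extract_available_actions text)

-- ===== LEMMAS AND PROOFS =====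

-- dropWhile is idempotent
theorem ea_dropWhile_idem {α : Type} (p : α → Bool) (l : List α) :
    List.dropWhile p (List.dropWhile p l) = List.dropWhile p l := by
  induction l with
  | nil => simp
  | cons a l ih =>
    by_cases h : p a
    · simp [h, ih]
    · simp [h]

theorem ea_rstrip_idem (l : List Char) :
    PySem.Chars.rstrip (PySem.Chars.rstrip l) = PySem.Chars.rstrip l := by
  simp [PySem.Chars.rstrip, ea_dropWhile_idem]

theorem ea_lstrip_of_rstrip_lstrip (l : List Char) :
    PySem.Chars.lstrip (PySem.Chars.rstrip (PySem.Chars.lstrip l)) =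
      PySem.Chars.rstrip (PySem.Chars.lstrip l) := by
  simp only [PySem.Chars.lstrip, PySem.Chars.rstrip]
  rcases hv : (List.dropWhile PySem.Chars.isspace
      (List.dropWhile PySem.Chars.isspace l).reverse).reverse with _ | ⟨a, t⟩
  · simp
  · have hpre : (List.dropWhile PySem.Chars.isspace
        (List.dropWhile PySem.Chars.isspace l).reverse).reverse <+:
        List.dropWhile PySem.Chars.isspace l := by
      rw [← List.reverse_suffix, List.reverse_reverse]
      exact List.dropWhile_suffix _
    obtain ⟨s, hs⟩ := hpre
    rw [hv, List.cons_append] at hs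
    have hne : List.dropWhile PySem.Chars.isspace l ≠ [] := by rw [← hs]; simp
    have hpa : PySem.Chars.isspace a = false := by
      have h0 := List.head_dropWhile_not PySem.Chars.isspace hne
      have h1 : (List.dropWhile PySem.Chars.isspace l).head hne = a := by
        simp only [← hs, List.head_cons]
      rwa [h1] at h0
    simp [hpa]

theorem ea_chars_strip_idem (x : List Char) :
    PySem.Chars.strip (PySem.Chars.strip x) = PySem.Chars.strip x := by
  simp only [PySem.Chars.strip]
  rw [ea_lstrip_of_rstrip_lstrip, ea_rstrip_idem]

theorem ea_strip_idem (s : String) :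
    PySem.Str.strip (PySem.Str.strip s) = PySem.Str.strip s := by
  have h := congrArg String.ofList (ea_chars_strip_idem s.toList)
  simpa [PySem.Str.strip, String.toList_ofList, PySem.Str.toList_strip] using h

-- ---- recursive reference evaluator shared by both directions ----
def eaAct (l : String) : String := PySem.Str.strip (PySem.Str.slice l (some 2) none)

def eaAddT (t : String) (bs : List String) (r : List String × List String) :
    List String × List String :=
  if t == "longitudinal" then (bs ++ r.1, r.2) else (r.1, bs ++ r.2)

def eaQ : String → List String → List String × List String
  | _, [] => ([], [])
  | t, l :: ls =>
    match eaHdr? l with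
    | some t' => eaQ t' ls
    | none =>
      if PySem.Str.startswith l "- " then
        let r := eaQ t ls
        if t == "longitudinal" then (eaAct l :: r.1, r.2) else (r.1, eaAct l :: r.2)
      else eaQ t ls

def eaQ0 : List String → List String × List String
  | [] => ([], [])
  | l :: ls =>
    match eaHdr? l with
    | some t => eaQ t ls
    | none => eaQ0 ls

-- ---- A-side: the fold equals the reference evaluator ----
theorem eaA_fold : ∀ (ls : List String), (∀ l ∈ ls, PySem.Str.strip l = l) →
    ∀ (lon lat : List String) (sec : Option String),
      (sec = none ∨ sec = some "longitudinal" ∨ sec = some "lateral") →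
      (ls.foldl eaStepA (lon, lat, sec)).1 =
        lon ++ (match sec with | some t => eaQ t ls | none => eaQ0 ls).1 ∧
      (ls.foldl eaStepA (lon, lat, sec)).2.1 =
        lat ++ (match sec with | some t => eaQ t ls | none => eaQ0 ls).2 := by
  intro ls
  induction ls with
  | nil =>
    intro _ lon lat sec hsec
    rcases hsec with rfl | rfl | rfl <;> simp [eaQ, eaQ0]
  | cons l ls ih =>
    intro hls lon lat sec hsec
    have hl : PySem.Str.strip l = l := hls l (List.mem_cons_self ..)
    have hT : ∀ x ∈ ls, PySem.Str.strip x = x := fun x hx => hls x (List.mem_cons_of_mem _ hx)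
    by_cases h1 : PySem.Str.startswith l "Feasible longitudinal actions:"
    · simp at h1
      have hstep : eaStepA (lon, lat, sec) l = (lon, lat, some "longitudinal") := by
        simp [eaStepA, hl, h1]
      rcases hsec with rfl | rfl | rfl <;>
        simpa [List.foldl_cons, hstep, eaQ, eaQ0, eaHdr?, h1] using
          ih hT lon lat (some "longitudinal") (Or.inr (Or.inl rfl))
    · simp at h1
      by_cases h2 : PySem.Str.startswith l "Feasible lateral actions:"
      · simp at h2
        have hstep : eaStepA (lon, lat, sec) l = (lon, lat, some "lateral") := by
          simp [eaStepA, hl, h1, h2]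
        rcases hsec with rfl | rfl | rfl <;>
          simpa [List.foldl_cons, hstep, eaQ, eaQ0, eaHdr?, h1, h2] using
            ih hT lon lat (some "lateral") (Or.inr (Or.inr rfl))
      · simp at h2
        by_cases h3 : PySem.Str.startswith l "- "
        · simp at h3
          rcases hsec with rfl | rfl | rfl
          · have hstep : eaStepA (lon, lat, none) l = (lon, lat, none) := by
              simp [eaStepA, hl, h1, h2, h3]
            simpa [List.foldl_cons, hstep, eaQ0, eaHdr?, h1, h2, h3] using
              ih hT lon lat none (Or.inl rfl)
          · have hstep : eaStepA (lon, lat, some "longitudinal") l =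
                (lon ++ [eaAct l], lat, some "longitudinal") := by
              simp [eaStepA, hl, h1, h2, h3, eaAct]
            have h4 := ih hT (lon ++ [eaAct l]) lat (some "longitudinal") (Or.inr (Or.inl rfl))
            simp only [List.foldl_cons, hstep]
            simpa [eaQ, eaHdr?, h1, h2, h3, List.append_assoc] using h4
          · have hstep : eaStepA (lon, lat, some "lateral") l =
                (lon, lat ++ [eaAct l], some "lateral") := by
              simp [eaStepA, hl, h1, h2, h3, eaAct]
            have h4 := ih hT lon (lat ++ [eaAct l]) (some "lateral") (Or.inr (Or.inr rfl))
            simp only [List.foldl_cons, hstep]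
            simpa [eaQ, eaHdr?, h1, h2, h3, List.append_assoc] using h4
        · simp at h3
          have hstep : eaStepA (lon, lat, sec) l = (lon, lat, sec) := by
            simp [eaStepA, hl, h1, h2, h3]
          rcases hsec with rfl | rfl | rfl <;>
          · simp only [List.foldl_cons, hstep]
            simpa [eaQ, eaQ0, eaHdr?, h1, h2, h3] using ih hT lon lat _ (by simp)

-- ---- B-side natural-index reformulation ----
def eaHdrsN : Nat → List String → List (Nat × String)
  | _, [] => []
  | n, l :: ls =>
    match eaHdr? l with
    | some t => (n, t) :: eaHdrsN (n + 1) ls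
    | none => eaHdrsN (n + 1) ls

def eaStepN (lines : List String) (acc : List String × List String)
    (q : (Nat × String) × Nat) : List String × List String :=
  let bs := eaBullets ((lines.drop (q.1.1 + 1)).take (q.2 - (q.1.1 + 1)))
  if q.1.2 == "longitudinal" then (acc.1 ++ bs, acc.2) else (acc.1, acc.2 ++ bs)

def eaPairs (n : Nat) (hs : List (Nat × String)) : List ((Nat × String) × Nat) :=
  hs.zip (hs.tail.map (·.1) ++ [n])

theorem eaHdrsN_shift (ls : List String) : ∀ (n : Nat),
    eaHdrsN n ls = (eaHdrsN 0 ls).map (fun p => (p.1 + n, p.2)) := by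
  induction ls with
  | nil => intro n; simp [eaHdrsN]
  | cons l ls ih =>
    intro n
    cases h : eaHdr? l with
    | some t =>
      simp only [eaHdrsN, h, ih (n + 1), ih 1, List.map_cons, List.map_map]
      refine congrArg₂ List.cons (by simp) ?_
      refine List.map_congr_left fun p _ => ?_
      simp [Function.comp]
      omega
    | none =>
      simp only [eaHdrsN, h, ih (n + 1), ih 1, List.map_map]
      refine List.map_congr_left fun p _ => ?_
      simp [Function.comp]
      omega

theorem eaHdrsN_head_lt (ls : List String) : ∀ (n i : Nat) (t : String) (hs' : List (Nat × String)),
    eaHdrsN n ls = (i, t) :: hs' → n ≤ i ∧ i < n + ls.length := by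
  induction ls with
  | nil => intro n i t hs' h; simp [eaHdrsN] at h
  | cons l ls ih =>
    intro n i t hs' h
    cases hh : eaHdr? l with
    | some t' =>
      simp only [eaHdrsN, hh] at h
      obtain ⟨h1, -⟩ := List.cons.injEq .. ▸ h
      obtain ⟨rfl, -⟩ := Prod.mk.injEq .. ▸ h1
      simp
    | none =>
      simp only [eaHdrsN, hh] at h
      have := ih (n + 1) i t hs' h
      constructor <;> [omega; (simp; omega)]

theorem eaHdrsN_drop (ls : List String) : ∀ (i : Nat) (t : String) (hs' : List (Nat × String)),
    eaHdrsN 0 ls = (i, t) :: hs' →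
      hs' = (eaHdrsN 0 (ls.drop (i + 1))).map (fun p => (p.1 + (i + 1), p.2)) := by
  induction ls with
  | nil => intro i t hs' h; simp [eaHdrsN] at h
  | cons l ls ih =>
    intro i t hs' h
    cases hh : eaHdr? l with
    | some t' =>
      simp only [eaHdrsN, hh] at h
      obtain ⟨h1, rfl⟩ := List.cons.injEq .. ▸ h
      obtain ⟨h0, -⟩ := Prod.mk.injEq .. ▸ h1
      subst h0
      simpa using eaHdrsN_shift ls 1
    | none =>
      simp only [eaHdrsN, hh, eaHdrsN_shift ls 1] at h
      cases hH : eaHdrsN 0 ls with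
      | nil => rw [hH] at h; simp at h
      | cons p r =>
        rw [hH] at h
        obtain ⟨j, t0⟩ := p
        simp only [List.map_cons] at h
        obtain ⟨h1, h2⟩ := List.cons.injEq .. ▸ h
        obtain ⟨hji, ht⟩ := Prod.mk.injEq .. ▸ h1
        have hIH := ih j t0 _ hH
        subst h2 ht
        have hj : i = j + 1 := by omega
        subst hj
        rw [hIH, List.map_map]
        have hdr : (l :: ls).drop (j + 1 + 1) = ls.drop (j + 1) := by simp
        rw [hdr]
        refine List.map_congr_left fun p _ => ?_
        simp [Function.comp]; omega

theorem eaStepN_acc (lines : List String) (qs : List ((Nat × String) × Nat)) :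
    ∀ (a b : List String),
      qs.foldl (eaStepN lines) (a, b) =
        (a ++ (qs.foldl (eaStepN lines) ([], [])).1,
         b ++ (qs.foldl (eaStepN lines) ([], [])).2) := by
  induction qs with
  | nil => intro a b; simp
  | cons q qs ih =>
    intro a b
    simp only [List.foldl_cons]
    set bs := eaBullets ((lines.drop (q.1.1 + 1)).take (q.2 - (q.1.1 + 1))) with hbs
    cases hq : (q.1.2 == "longitudinal")
    · have h1 : eaStepN lines (a, b) q = (a, b ++ bs) := by simp [eaStepN, hq, hbs]
      have h2 : eaStepN lines ([], []) q = ([], bs) := by simp [eaStepN, hq, hbs]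
      rw [h1, h2, ih a (b ++ bs), ih [] bs]
      simp [List.append_assoc]
    · have h1 : eaStepN lines (a, b) q = (a ++ bs, b) := by simp [eaStepN, hq, hbs]
      have h2 : eaStepN lines ([], []) q = (bs, []) := by simp [eaStepN, hq, hbs]
      rw [h1, h2, ih (a ++ bs) b, ih bs []]
      simp [List.append_assoc]

theorem eaAddT_cons (t : String) (a : String) (bs : List String)
    (r : List String × List String) :
    (if t == "longitudinal" then ((eaAddT t bs r).1.cons a, (eaAddT t bs r).2)
     else ((eaAddT t bs r).1, (eaAddT t bs r).2.cons a)) = eaAddT t (a :: bs) r := by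
  unfold eaAddT
  cases t == "longitudinal" <;> simp

theorem eaQ0_char (ls : List String) :
    eaQ0 ls = (match eaHdrsN 0 ls with
      | [] => ([], [])
      | (i, t) :: _ => eaQ t (ls.drop (i + 1))) := by
  induction ls with
  | nil => simp [eaQ0, eaHdrsN]
  | cons l ls ih =>
    cases hh : eaHdr? l with
    | some t => simp [eaQ0, eaHdrsN, hh]
    | none =>
      simp only [eaQ0, eaHdrsN, hh]
      rw [ih, eaHdrsN_shift ls 1]
      cases hH : eaHdrsN 0 ls with
      | nil => simp
      | cons p r => simp

theorem eaQ_char (ls : List String) : ∀ (t : String),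
    eaQ t ls = (match eaHdrsN 0 ls with
      | [] => eaAddT t (eaBullets ls) ([], [])
      | (i, t') :: _ => eaAddT t (eaBullets (ls.take i)) (eaQ t' (ls.drop (i + 1)))) := by
  induction ls with
  | nil => intro t; simp [eaQ, eaHdrsN, eaBullets, eaAddT]
  | cons l ls ih =>
    intro t
    cases hh : eaHdr? l with
    | some t' => simp [eaQ, eaHdrsN, hh, eaBullets, eaAddT]
    | none =>
      by_cases hb : PySem.Str.startswith l "- "
      · have hb' : PySem.Chars.startswith l.toList ['-', ' '] = true := by simpa using hb
        have hQ : eaQ t (l :: ls) =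
            (if t == "longitudinal" then ((eaQ t ls).1.cons (eaAct l), (eaQ t ls).2)
             else ((eaQ t ls).1, (eaQ t ls).2.cons (eaAct l))) := by
          simp only [eaQ, hh, hb, if_true]
        rw [hQ, ih t]
        simp only [eaHdrsN, hh, eaHdrsN_shift ls 1]
        cases hH : eaHdrsN 0 ls with
        | nil =>
          simp only [List.map_nil]
          rw [eaAddT_cons]
          have : eaBullets (l :: ls) = eaAct l :: eaBullets ls := by
            simp [eaBullets, hb', eaAct]
          rw [this]
        | cons p r =>
          obtain ⟨i, t0⟩ := p
          simp only [List.map_cons]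
          rw [eaAddT_cons]
          have h1 : (l :: ls).take (i + 1) = l :: ls.take i := by simp
          have h2 : (l :: ls).drop (i + 1 + 1) = ls.drop (i + 1) := by simp
          rw [h1, h2]
          have : eaBullets (l :: ls.take i) = eaAct l :: eaBullets (ls.take i) := by
            simp [eaBullets, hb', eaAct]
          rw [this]
      · have hb' : PySem.Chars.startswith l.toList ['-', ' '] = false := by
          simpa using hb
        have hQ : eaQ t (l :: ls) = eaQ t ls := by
          simp [eaQ, hh, hb']
        rw [hQ, ih t]
        simp only [eaHdrsN, hh, eaHdrsN_shift ls 1]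
        cases hH : eaHdrsN 0 ls with
        | nil =>
          simp only [List.map_nil]
          have : eaBullets (l :: ls) = eaBullets ls := by simp [eaBullets, hb']
          rw [this]
        | cons p r =>
          obtain ⟨i, t0⟩ := p
          simp only [List.map_cons]
          have h1 : (l :: ls).take (i + 1) = l :: ls.take i := by simp
          have h2 : (l :: ls).drop (i + 1 + 1) = ls.drop (i + 1) := by simp
          rw [h1, h2]
          have : eaBullets (l :: ls.take i) = eaBullets (ls.take i) := by
            simp [eaBullets, hb']
          rw [this]

theorem eaPairs_cons (n : Nat) (h : Nat × String) (hs : List (Nat × String)) :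
    eaPairs n (h :: hs) =
      (h, match hs with | [] => n | q :: _ => q.1) :: eaPairs n hs := by
  cases hs <;> simp [eaPairs]

theorem eaShift (lines : List String) (i : Nat) (hle : i + 1 ≤ lines.length)
    (H : List (Nat × String)) :
    (eaPairs lines.length (H.map (fun p => (p.1 + (i + 1), p.2)))).foldl
        (eaStepN lines) ([], []) =
      (eaPairs (lines.drop (i + 1)).length H).foldl (eaStepN (lines.drop (i + 1))) ([], []) := by
  unfold eaPairs
  have hlen : lines.length = (lines.drop (i + 1)).length + (i + 1) := by
    simp; omega
  have hb : ((H.map (fun p => (p.1 + (i + 1), p.2))).tail.map (·.1) ++ [lines.length]) =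
      ((H.tail.map (·.1) ++ [(lines.drop (i + 1)).length]).map (· + (i + 1))) := by
    rw [← List.map_tail, List.map_map, List.map_append, List.map_map, hlen]
    simp
    exact congrArg List.tail (List.map_congr_left fun p _ => rfl)
  rw [hb, List.zip_map, List.foldl_map]
  have hfun : (fun (acc : List String × List String) (q : (Nat × String) × Nat) =>
      eaStepN lines acc (Prod.map (fun p => (p.1 + (i + 1), p.2)) (· + (i + 1)) q)) =
      eaStepN (lines.drop (i + 1)) := by
    funext acc q
    obtain ⟨⟨j, t'⟩, e⟩ := q
    simp only [eaStepN, Prod.map]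
    have h1 : lines.drop (j + (i + 1) + 1) = (lines.drop (i + 1)).drop (j + 1) := by
      rw [List.drop_drop]; ring_nf
    have h2 : e + (i + 1) - (j + (i + 1) + 1) = e - (j + 1) := by omega
    rw [h1, h2]
  rw [hfun]

theorem eaB_main : ∀ (n : Nat) (lines : List String), lines.length ≤ n →
    (eaPairs lines.length (eaHdrsN 0 lines)).foldl (eaStepN lines) ([], []) = eaQ0 lines := by
  intro n
  induction n with
  | zero =>
    intro lines h
    have : lines = [] := List.eq_nil_of_length_eq_zero (Nat.le_zero.mp h)
    subst this
    simp [eaPairs, eaHdrsN, eaQ0]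
  | succ n ih =>
    intro lines hlen
    rw [eaQ0_char]
    cases hH : eaHdrsN 0 lines with
    | nil => simp [eaPairs]
    | cons p hs' =>
      obtain ⟨i, t⟩ := p
      have hb := eaHdrsN_head_lt lines 0 i t hs' hH
      have hdrop := eaHdrsN_drop lines i t hs' hH
      have hle : i + 1 ≤ lines.length := by omega
      rw [eaPairs_cons, List.foldl_cons]
      show _ = eaQ t (lines.drop (i + 1))
      have hX : (eaPairs lines.length hs').foldl (eaStepN lines) ([], []) =
          eaQ0 (lines.drop (i + 1)) := by
        rw [hdrop, eaShift lines i hle]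
        exact ih _ (by simp; omega)
      generalize hE : (match hs' with | [] => lines.length | q :: tail => q.1) = e₀
      have hstep : eaStepN lines ([], []) ((i, t), e₀) =
          eaAddT t (eaBullets ((lines.drop (i + 1)).take (e₀ - (i + 1)))) ([], []) := by
        simp only [eaStepN, eaAddT]
        cases t == "longitudinal" <;> simp
      rw [hstep, eaStepN_acc, hX]
      have haddT : ∀ (bs : List String) (r : List String × List String),
          ((eaAddT t bs ([], [])).1 ++ r.1, (eaAddT t bs ([], [])).2 ++ r.2) =
            eaAddT t bs r := by
        intro bs r
        unfold eaAddT
        cases t == "longitudinal" <;> simp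
      rw [haddT]
      rw [eaQ_char]
      cases hH' : eaHdrsN 0 (lines.drop (i + 1)) with
      | nil =>
        have hs'nil : hs' = [] := by rw [hdrop, hH']; simp
        have he : e₀ = lines.length := by rw [hs'nil] at hE; simpa using hE.symm
        have htake : (lines.drop (i + 1)).take (e₀ - (i + 1)) = lines.drop (i + 1) := by
          apply List.take_of_length_le; simp [he]
        rw [htake, eaQ0_char (lines.drop (i + 1)), hH']
      | cons q r =>
        obtain ⟨j, t'⟩ := q
        have hs'head : hs' = (j + (i + 1), t') :: r.map (fun p => (p.1 + (i + 1), p.2)) := by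
          rw [hdrop, hH']; simp
        have he : e₀ = j + (i + 1) := by rw [hs'head] at hE; simpa using hE.symm
        have harith : e₀ - (i + 1) = j := by omega
        rw [harith, eaQ0_char (lines.drop (i + 1)), hH']

theorem eaEnum (ls : List String) : ∀ (n : Nat),
    (PySem.List.enumerate ls (n : Int)).filterMap
        (fun p => (eaHdr? p.2).map (fun t => (p.1, t))) =
      (eaHdrsN n ls).map (fun p => ((p.1 : Int), p.2)) := by
  induction ls with
  | nil => intro n; simp [eaHdrsN, PySem.List.enumerate_nil]
  | cons l ls ih =>
    intro n
    rw [PySem.List.enumerate_cons, List.filterMap_cons]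
    have hcast : (n : Int) + 1 = ((n + 1 : Nat) : Int) := by push_cast; ring
    rw [hcast, ih (n + 1)]
    cases hh : eaHdr? l with
    | some t => simp [eaHdrsN, hh]
    | none => simp [eaHdrsN, hh]

theorem eaAlt_eq_Q0 (text : String) :
    extract_available_actions_alt text =
      eaQ0 (((PySem.Str.split? text "\n").getD []).map PySem.Str.strip) := by
  simp only [extract_available_actions_alt]
  have hE0 := eaEnum (((PySem.Str.split? text "\n").getD []).map PySem.Str.strip) 0
  rw [Nat.cast_zero] at hE0
  rw [hE0, PySem.List.slice_from_one, ← List.map_tail, List.map_map]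
  set lines := ((PySem.Str.split? text "\n").getD []).map PySem.Str.strip with hlines
  set hs := eaHdrsN 0 lines with hhs
  have hb2 : hs.tail.map (Prod.fst ∘ (fun (p : Nat × String) => ((p.1 : Int), p.2))) ++
        [(lines.length : Int)] =
      (hs.tail.map (·.1) ++ [lines.length]).map (fun (k : Nat) => (k : Int)) := by
    rw [List.map_append, List.map_map]
    rfl
  rw [hb2]
  rw [List.zip_map, List.foldl_map]
  have hstep : ∀ (acc : List String × List String) (q : (Nat × String) × Nat),
      q ∈ (hs.zip (hs.tail.map (·.1) ++ [lines.length])) →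
      (fun (acc : List String × List String)
           (q' : (Int × String) × Int) =>
        let seg := PySem.List.slice lines (some (q'.1.1 + 1)) (some q'.2)
        let bs := eaBullets seg
        if q'.1.2 == "longitudinal" then (acc.1 ++ bs, acc.2) else (acc.1, acc.2 ++ bs)) acc
        (Prod.map (fun p => ((p.1 : Int), p.2)) (fun (k : Nat) => (k : Int)) q) =
      eaStepN lines acc q := by
    intro acc q _
    obtain ⟨⟨j, t'⟩, e⟩ := q
    simp only [Prod.map, eaStepN]
    have h1 : ((j : Int) + 1) = (((j + 1 : Nat) : Int)) := by push_cast; ring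
    rw [h1, PySem.List.slice_natCast]
  refine Eq.trans (List.foldl_ext _ (eaStepN lines) ([], []) ?_)
    (eaB_main lines.length lines le_rfl)
  intro acc q hq
  exact hstep acc q hq

-- ===== VERDICT (by name: the statement is the Claim_ definition above) =====
theorem extract_available_actions_spec : Claim_equal_extract_available_actions := by
  intro text _
  unfold Spec_extract_available_actions
  rw [eaAlt_eq_Q0]
  show (let lines := ((PySem.Str.split? text "\n").getD []).map PySem.Str.strip
        let r := lines.foldl eaStepA ([], [], none)
        (r.1, r.2.1)) = _
  have hls : ∀ l ∈ ((PySem.Str.split? text "\n").getD []).map PySem.Str.strip,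
      PySem.Str.strip l = l := by
    intro l hl
    rcases List.mem_map.1 hl with ⟨x, _, rfl⟩
    exact ea_strip_idem x
  have h := eaA_fold _ hls [] [] none (Or.inl rfl)
  simp only [List.nil_append] at h
  exact Prod.ext h.1 h.2
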